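-- pv_equiv track=rewrite | github.com/Mohammed-Mahmoud-Elsayed-Ahmed-MMES/automata_practical_exam_-4555- | dfa_101.py | dfa_101
-- ===== SOURCE A (Python) =====
-- def dfa_101(binary_string):
--     """
--     Implements a Deterministic Finite Automaton (DFA) to detect if a binary string
--     contains the substring "101". The DFA has four states: q0 (start), q1, q2, and
--     q3 (accepting state). It transitions based on input (0 or 1) and accepts only
--     if it ends in state q3, indicating "101" was found.
--
--     Args:
--         binary_string (str): The input string to check, expected to contain only 0s and 1s.
--
--     Returns:
--         str: Result message indicating acceptance ("Accepted: Contains '101'") or rejection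
--              ("Rejected: Does not contain '101'ended in {state}") with the final state.
--     """
--     state = "q0"  # Initialize to the start state q0
--     for char in binary_string:
--         # Validate that the input contains only binary digits (0 or 1)
--         if char not in "01":
--             return "Invalid input: Use only 0s and 1s"
--
--         # State transition logic based on current state and input
--         if state == "q0":
--             if char == "1":  # Transition to q1 on seeing '1'
--                 state = "q1"
--             # If char is '0', remain in q0 (implicit transition)
--         elif state == "q1":
--             if char == "0":  # Transition to q2 on seeing '0' after '1'
--                 state = "q2"
--             else:  # char == "1", stay in q1 (e.g., "11" keeps us in q1)
--                 state = "q1"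
--         elif state == "q2":
--             if char == "1":  # Transition to q3 (accepting state) on seeing '1' after '10'
--                 state = "q3"
--             else:  # char == "0", reset to q0 (e.g., "100" resets)
--                 state = "q0"
--         elif state == "q3":
--             # Once "101" is detected, stay in q3 regardless of further input
--             pass
--
--     # Check the final state to determine acceptance
--     if state == "q3":
--         return "Accepted: Contains '101'"
--     else:
--         return f"Rejected: Does not contain '101'ended in {state}"
-- ===== SOURCE B (Python) =====
-- def dfa_101(binary_string):
--     """Substring test plus suffix classification instead of a state-transition loop."""
--     if any(c not in "01" for c in binary_string):
--         return "Invalid input: Use only 0s and 1s"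
--     if "101" in binary_string:
--         return "Accepted: Contains '101'"
--     if binary_string.endswith("10"):
--         state = "q2"
--     elif binary_string.endswith("1"):
--         state = "q1"
--     else:
--         state = "q0"
--     return f"Rejected: Does not contain '101'ended in {state}"
-- ===== Notes on version B (the rewrite author's own statement) =====
-- stated objective: simpler
-- what changed: Replaces the explicit four-state transition loop with a one-shot validation pass, a substring containment test for acceptance, and a two-character suffix classification of the final state for the reject message.
import Mathlib
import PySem

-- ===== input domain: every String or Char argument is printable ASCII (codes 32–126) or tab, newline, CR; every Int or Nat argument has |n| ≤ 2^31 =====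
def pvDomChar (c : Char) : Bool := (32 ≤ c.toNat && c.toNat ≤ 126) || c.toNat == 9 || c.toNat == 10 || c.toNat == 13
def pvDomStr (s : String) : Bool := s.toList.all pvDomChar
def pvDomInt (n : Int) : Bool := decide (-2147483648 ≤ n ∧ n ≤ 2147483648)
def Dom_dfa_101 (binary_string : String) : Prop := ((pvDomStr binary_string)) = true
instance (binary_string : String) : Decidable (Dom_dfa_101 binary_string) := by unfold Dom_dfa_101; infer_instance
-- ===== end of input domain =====

-- B replaces A's explicit four-state transition loop with a validation pass, a substring
-- containment test and a suffix classification for the reject message (objective: simpler).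


-- ===== PORT A =====
-- A's state-transition logic for one character (the body of A's loop).
def dfaStep (state : String) (c : Char) : String :=
  if state == "q0" then (if c == '1' then "q1" else state)
  else if state == "q1" then (if c == '0' then "q2" else "q1")
  else if state == "q2" then (if c == '1' then "q3" else "q0")
  else state   -- state == "q3": stay

-- A's loop with its early return on a non-binary character, then the final check.
def dfa101Go : List Char → String → String
  | [], state =>
      if state == "q3" then "Accepted: Contains '101'"
      else "Rejected: Does not contain '101'ended in " ++ state
  | c :: rest, state =>
      if !(c == '0' || c == '1') then "Invalid input: Use only 0s and 1s"
      else dfa101Go rest (dfaStep state c)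

def dfa_101 (binary_string : String) : String :=
  dfa101Go binary_string.toList "q0"

-- ===== PORT B =====
def dfa_101_alt (binary_string : String) : String :=
  if binary_string.toList.any (fun c => !(c == '0' || c == '1')) then
    "Invalid input: Use only 0s and 1s"
  else if PySem.Str.isIn "101" binary_string then "Accepted: Contains '101'"
  else
    let state :=
      if PySem.Str.endswith binary_string "10" then "q2"
      else if PySem.Str.endswith binary_string "1" then "q1"
      else "q0"
    "Rejected: Does not contain '101'ended in " ++ state

-- ===== PRECONDITION & SPEC =====
def Spec_dfa_101 (binary_string : String) (out : String) : Prop := out = dfa_101_alt binary_string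
instance (binary_string : String) (out : String) : Decidable (Spec_dfa_101 binary_string out) := by unfold Spec_dfa_101; infer_instance

-- ===== CLAIM (what is proved, stated in full; the proofs are below) =====
def Claim_equal_dfa_101 : Prop := ∀ (binary_string : String), Dom_dfa_101 binary_string → Spec_dfa_101 binary_string (dfa_101 binary_string)

-- ===== LEMMAS AND PROOFS =====

-- The state B's suffix classification assigns to a fully binary word.
def classify (cs : List Char) : String :=
  if PySem.Chars.isIn ['1', '0', '1'] cs then "q3"
  else if PySem.Chars.endswith cs ['1', '0'] then "q2"
  else if PySem.Chars.endswith cs ['1'] then "q1"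
  else "q0"

lemma endswith_eq_decide (s p : List Char) :
    PySem.Chars.endswith s p = decide (p <:+ s) := by
  by_cases hp : p <:+ s
  · simp [hp, (PySem.Chars.endswith_iff s p).mpr hp]
  · simp only [hp, decide_false]
    rw [Bool.eq_false_iff]
    intro ht
    exact hp ((PySem.Chars.endswith_iff s p).mp ht)

lemma isIn_eq_decide (sub s : List Char) :
    PySem.Chars.isIn sub s = decide (sub <:+: s) := by
  by_cases hp : sub <:+: s
  · simp [hp, (PySem.Chars.isIn_iff_infix (sub := sub) (s := s)).mpr hp]
  · simp [hp, (PySem.Chars.isIn_eq_false_iff (sub := sub) (s := s)).mpr hp]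

lemma go_of_bad (cs : List Char) (st : String)
    (h : cs.any (fun c => !(c == '0' || c == '1')) = true) :
    dfa101Go cs st = "Invalid input: Use only 0s and 1s" := by
  induction cs generalizing st with
  | nil => simp at h
  | cons c rest ih =>
      cases hc : (c == '0' || c == '1') with
      | false => simp [dfa101Go, hc]
      | true =>
          have hr : rest.any (fun c => !(c == '0' || c == '1')) = true := by
            simp only [List.any_cons, hc, Bool.not_true, Bool.false_or] at h
            exact h
          simp [dfa101Go, hc, ih _ hr]

lemma go_of_good (cs : List Char) (st : String)
    (h : cs.all (fun c => c == '0' || c == '1') = true) :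
    dfa101Go cs st =
      (if List.foldl dfaStep st cs == "q3" then "Accepted: Contains '101'"
       else "Rejected: Does not contain '101'ended in " ++ List.foldl dfaStep st cs) := by
  induction cs generalizing st with
  | nil => simp [dfa101Go]
  | cons c rest ih =>
      simp only [List.all_cons, Bool.and_eq_true] at h
      simp [dfa101Go, h.1, ih _ h.2]

lemma endswith_append_one (l : List Char) (c : Char) :
    PySem.Chars.endswith (l ++ [c]) ['1'] = (c == '1') := by
  rw [endswith_eq_decide, Bool.eq_iff_iff]
  have hiff : (['1'] <:+ l ++ [c]) ↔ c = '1' := by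
    rw [← List.reverse_prefix]
    simp [List.cons_prefix_cons, eq_comm]
  simp [hiff, beq_iff_eq]

lemma endswith_append_ten (l : List Char) (c : Char) :
    PySem.Chars.endswith (l ++ [c]) ['1', '0'] =
      (c == '0' && PySem.Chars.endswith l ['1']) := by
  rw [endswith_eq_decide, endswith_eq_decide, Bool.eq_iff_iff]
  have hiff : (['1', '0'] <:+ l ++ [c]) ↔ (c = '0' ∧ ['1'] <:+ l) := by
    rw [← List.reverse_prefix, ← List.reverse_prefix]
    simp [List.cons_prefix_cons, eq_comm]
  simp [hiff, beq_iff_eq]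

lemma isIn_append (l : List Char) (c : Char) :
    PySem.Chars.isIn ['1', '0', '1'] (l ++ [c]) =
      (PySem.Chars.isIn ['1', '0', '1'] l ||
        (c == '1' && PySem.Chars.endswith l ['1', '0'])) := by
  rw [isIn_eq_decide, isIn_eq_decide, endswith_eq_decide, Bool.eq_iff_iff]
  have hpal : (['1', '0', '1'] : List Char) <:+: l.reverse ↔ ['1', '0', '1'] <:+: l := by
    conv_lhs => rw [show (['1', '0', '1'] : List Char) = ['1', '0', '1'].reverse by decide]
    exact List.reverse_infix
  have hten : (['0', '1'] : List Char) <+: l.reverse ↔ ['1', '0'] <:+ l := by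
    conv_lhs => rw [show (['0', '1'] : List Char) = ['1', '0'].reverse by decide]
    exact List.reverse_prefix
  have key : (['1', '0', '1'] <:+: l ++ [c]) ↔
      (['1', '0', '1'] <:+: l ∨ (c = '1' ∧ ['1', '0'] <:+ l)) := by
    rw [← List.reverse_infix, show (['1', '0', '1'] : List Char).reverse = ['1', '0', '1'] by decide,
      List.reverse_append, List.reverse_singleton, List.singleton_append,
      List.infix_cons_iff, List.cons_prefix_cons, hpal, hten]
    simp [eq_comm, or_comm]
  simp [key, beq_iff_eq]

lemma ends_ten_excl (l : List Char)
    (h : PySem.Chars.endswith l ['1', '0'] = true) :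
    PySem.Chars.endswith l ['1'] = false := by
  rw [endswith_eq_decide] at h ⊢
  simp only [decide_eq_true_eq] at h
  simp only [decide_eq_false_iff_not]
  rw [← List.reverse_prefix] at h ⊢
  rintro ⟨t1, ht1⟩
  rcases h with ⟨t0, ht0⟩
  have h2 : (['1', '0'] : List Char).reverse ++ t0 = ['1'].reverse ++ t1 := ht0.trans ht1.symm
  simp at h2

lemma foldl_classify (cs : List Char)
    (h : cs.all (fun c => c == '0' || c == '1') = true) :
    List.foldl dfaStep "q0" cs = classify cs := by
  induction cs using List.reverseRecOn with
  | nil => decide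
  | append_singleton l c ih =>
      simp only [List.all_append, Bool.and_eq_true, List.all_cons, List.all_nil,
        Bool.and_true] at h
      rw [List.foldl_append, ih h.1]
      simp only [List.foldl_cons, List.foldl_nil]
      unfold classify
      rw [isIn_append, endswith_append_ten, endswith_append_one]
      cases h0 : (c == '0') with
      | true =>
          have h1 : (c == '1') = false := by
            simp only [beq_iff_eq] at h0 ⊢; subst h0; decide
          cases hi : PySem.Chars.isIn ['1', '0', '1'] l <;>
          cases he : PySem.Chars.endswith l ['1', '0']
          case false.true | true.true =>
            rw [ends_ten_excl l he]; simp [h0, h1, dfaStep]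
          all_goals
            cases he1 : PySem.Chars.endswith l ['1'] <;> simp [h0, h1, dfaStep]
      | false =>
          have h1 : (c == '1') = true := by
            rcases Bool.or_eq_true _ _ |>.mp h.2 with hh | hh
            · rw [hh] at h0; exact absurd h0 (by simp)
            · exact hh
          cases hi : PySem.Chars.isIn ['1', '0', '1'] l <;>
          cases he : PySem.Chars.endswith l ['1', '0']
          case false.true | true.true =>
            rw [ends_ten_excl l he]; simp [h0, h1, dfaStep]
          all_goals
            cases he1 : PySem.Chars.endswith l ['1'] <;> simp [h0, h1, dfaStep]

-- ===== VERDICT (by name: the statement is the Claim_ definition above) =====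
theorem dfa_101_spec : Claim_equal_dfa_101 := by
  intro s _
  unfold Spec_dfa_101 dfa_101 dfa_101_alt
  cases hb : (s.toList.any fun c => !(c == '0' || c == '1')) with
  | true => rw [go_of_bad _ _ hb]; rfl
  | false =>
      have hg : s.toList.all (fun c => c == '0' || c == '1') = true := by
        rw [List.all_eq_not_any_not]; simp only [hb]; rfl
      rw [go_of_good _ _ hg, foldl_classify _ hg]
      simp only [Bool.false_eq_true, if_false]
      have hin : PySem.Str.isIn "101" s = PySem.Chars.isIn ['1', '0', '1'] s.toList := by
        simp [PySem.Str.isIn]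
      have he10 : PySem.Str.endswith s "10" = PySem.Chars.endswith s.toList ['1', '0'] := by
        simp [PySem.Str.endswith]
      have he1 : PySem.Str.endswith s "1" = PySem.Chars.endswith s.toList ['1'] := by
        simp [PySem.Str.endswith]
      rw [hin, he10, he1]
      unfold classify
      cases hi : PySem.Chars.isIn ['1', '0', '1'] s.toList <;>
      cases hA : PySem.Chars.endswith s.toList ['1', '0'] <;>
      cases hB : PySem.Chars.endswith s.toList ['1'] <;>
        simp
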